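-- pv_equiv track=rewrite | github.com/raopriyam/Leetcode-CTCI-Python | gridOfNodes2.py | gridOfNodes
-- ===== SOURCE A (Python) =====
-- def gridOfNodes(grid):
--     ans = 0
--     last = 0
--     for i in grid:
--         count = i.count(1)
--         if count>0:
--             ans = ans + last*count
--             last =count
--     return ans
-- ===== SOURCE B (Python) =====
-- def gridOfNodes(grid):
--     # Recursive, back-to-front: go(rows) returns (sum of adjacent products of
--     # positive 1-counts in rows, first positive 1-count in rows or 0).
--     def go(rows):
--         if not rows:
--             return (0, 0)
--         ans, nxt = go(rows[1:])
--         c = rows[0].count(1)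
--         if c > 0:
--             return (ans + c * nxt, c)
--         return (ans, nxt)
--     return go(grid)[0]
-- ===== Notes on version B (the rewrite author's own statement) =====
-- stated objective: alternative
-- what changed: Replaced A's forward iteration with running ans/last state by a structural recursion that consumes the grid back-to-front, each call returning the pair (suffix answer, first positive row count of the suffix); no loop, no accumulator variables, no intermediate list.
import Mathlib
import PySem

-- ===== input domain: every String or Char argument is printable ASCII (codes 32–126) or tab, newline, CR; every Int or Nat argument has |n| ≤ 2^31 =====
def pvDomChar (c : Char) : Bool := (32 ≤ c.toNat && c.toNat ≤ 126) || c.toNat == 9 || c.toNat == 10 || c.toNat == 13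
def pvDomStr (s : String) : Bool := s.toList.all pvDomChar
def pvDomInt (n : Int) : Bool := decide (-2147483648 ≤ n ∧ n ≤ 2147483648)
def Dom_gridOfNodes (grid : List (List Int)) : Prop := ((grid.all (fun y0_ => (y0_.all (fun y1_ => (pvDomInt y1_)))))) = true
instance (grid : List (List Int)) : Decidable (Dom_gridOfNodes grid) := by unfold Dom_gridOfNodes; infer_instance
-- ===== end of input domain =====

-- B replaces A's forward loop with ans/last state by a back-to-front structural recursion returning (suffix answer, first positive count of the suffix); same cost, different decomposition.

-- ===== PORT A =====
def gridOfNodes (grid : List (List Int)) : Int :=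
  (grid.foldl (fun (st : Int × Int) i =>
      let count : Int := (PySem.List.count i 1 : Int)
      if count > 0 then (st.1 + st.2 * count, count) else st)
    (0, 0)).1

-- ===== PORT B =====
/-- `go rows` from Source B: (sum of adjacent products of positive 1-counts, first positive 1-count or 0). -/
def gridOfNodes_alt_go : List (List Int) → Int × Int
  | [] => (0, 0)
  | r :: rs =>
    let p := gridOfNodes_alt_go rs
    let c : Int := (PySem.List.count r 1 : Int)
    if c > 0 then (p.1 + c * p.2, c) else p

def gridOfNodes_alt (grid : List (List Int)) : Int :=
  (gridOfNodes_alt_go grid).1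

-- ===== PRECONDITION & SPEC =====
def Spec_gridOfNodes (grid : List (List Int)) (out : Int) : Prop := out = gridOfNodes_alt grid
instance (grid : List (List Int)) (out : Int) : Decidable (Spec_gridOfNodes grid out) := by unfold Spec_gridOfNodes; infer_instance

-- ===== CLAIM =====
def Claim_equal_gridOfNodes : Prop := ∀ (grid : List (List Int)), Dom_gridOfNodes grid → Spec_gridOfNodes grid (gridOfNodes grid)

-- ===== LEMMAS AND PROOFS =====

theorem fold_eq_go (grid : List (List Int)) (ans last : Int) :
    (grid.foldl (fun (st : Int × Int) i =>
        let count : Int := (PySem.List.count i 1 : Int)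
        if count > 0 then (st.1 + st.2 * count, count) else st)
      (ans, last)).1
      = ans + last * (gridOfNodes_alt_go grid).2 + (gridOfNodes_alt_go grid).1 := by
  induction grid generalizing ans last with
  | nil => simp [gridOfNodes_alt_go]
  | cons r rs ih =>
    by_cases h : (PySem.List.count r 1 : Int) > 0
    · simp only [List.foldl_cons, gridOfNodes_alt_go, if_pos h, ih]
      ring
    · simp only [List.foldl_cons, gridOfNodes_alt_go, if_neg h, ih]

-- ===== VERDICT =====
theorem gridOfNodes_spec : Claim_equal_gridOfNodes := by
  intro grid _
  unfold Spec_gridOfNodes gridOfNodes gridOfNodes_alt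
  rw [fold_eq_go]
  ring
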